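-- pv_equiv track=rewrite | github.com/HeshamAbedelatty/Building-a-process-discovery-technique-Alpha-algorithm- | process discovery technique (Alpha algorithm).py | printFollows
-- ===== SOURCE A (Python) =====
-- def printFollows(X):
--     my_dict = {}
--     j = 0
--     for i in X:
--         if i[0] not in my_dict.values():
--             my_dict[j] = i[0]
--             j += 1
--         if i[1] not in my_dict.values():
--             my_dict[j] = i[1]
--             j += 1
--     return my_dict
-- ===== SOURCE B (Python) =====
-- def printFollows(X):
--     # First-occurrence dedup by repeatedly taking the front element and
--     # stripping all its later duplicates from the remaining stream.
--     flat = [e for pair in X for e in (pair[0], pair[1])]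
--     uniques = []
--     rest = flat
--     while rest:
--         head = rest[0]
--         uniques.append(head)
--         rest = [e for e in rest[1:] if e != head]
--     return dict(enumerate(uniques))
-- ===== Notes on version B (the rewrite author's own statement) =====
-- stated objective: alternative
-- what changed: Instead of A's stateful dict/counter loop with membership tests against the accumulated values, B repeatedly takes the front of the (flattened) element stream and filters all its later duplicates out of the remaining stream, then keys the resulting unique list with dict(enumerate(...)).
import Mathlib
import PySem

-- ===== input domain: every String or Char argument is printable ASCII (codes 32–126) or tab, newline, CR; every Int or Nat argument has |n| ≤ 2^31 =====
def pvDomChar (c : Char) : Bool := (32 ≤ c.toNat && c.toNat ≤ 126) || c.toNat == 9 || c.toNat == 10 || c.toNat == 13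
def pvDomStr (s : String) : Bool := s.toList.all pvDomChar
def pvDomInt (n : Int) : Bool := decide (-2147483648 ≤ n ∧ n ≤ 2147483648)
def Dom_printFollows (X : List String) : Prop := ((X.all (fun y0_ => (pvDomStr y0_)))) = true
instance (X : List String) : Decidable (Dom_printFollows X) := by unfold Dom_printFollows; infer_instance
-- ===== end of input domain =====

-- B replaces A's stateful dict/counter loop by repeatedly taking the front of the
-- flattened element stream and filtering its later duplicates out of the remainder
-- (objective: alternative decomposition, same cost).

-- Python s[i] as a 1-char String (total form; only used under Pre_, where the index is in range)
def pyCharAt (s : String) (i : Int) : String :=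
  ((PySem.Str.pyGet? s i).map (fun c => String.ofList [c])).getD ""

-- ===== PORT A =====
def printFollows (X : List String) : List (Int × String) :=
  (X.foldl (fun (st : PySem.Dict Int String × Int) i =>
      let st1 := if pyCharAt i 0 ∈ st.1.values then st else (st.1.insert st.2 (pyCharAt i 0), st.2 + 1)
      if pyCharAt i 1 ∈ st1.1.values then st1 else (st1.1.insert st1.2 (pyCharAt i 1), st1.2 + 1))
    (PySem.Dict.empty, 0)).1.items

-- ===== PORT B =====
-- B's while loop: state (uniques, rest); rest shrinks strictly each iteration.
def pvLoop (uniques : List String) (rest : List String) : List String :=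
  match rest with
  | [] => uniques
  | head :: t => pvLoop (uniques ++ [head]) (t.filter (fun e => !(e == head)))
  termination_by rest.length
  decreasing_by simp only [List.length_unattach, List.length_cons]; exact Nat.lt_succ_of_le (by simpa using List.length_filter_le _ t.attach)

def printFollows_alt (X : List String) : List (Int × String) :=
  let flat := X.flatMap (fun p => [pyCharAt p 0, pyCharAt p 1])
  PySem.List.enumerate (pvLoop [] flat) 0

-- ===== PRECONDITION & SPEC =====
-- Pre_ excludes strings shorter than 2 characters, on which Python A raises IndexError (B raises there too).
def Pre_printFollows (X : List String) : Prop := ∀ s ∈ X, 2 ≤ s.toList.length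
instance (X : List String) : Decidable (Pre_printFollows X) := by unfold Pre_printFollows; infer_instance
def pvWitness_printFollows : List String := ["ab", "ba", "ca"]
def Spec_printFollows (X : List String) (out : List (Int × String)) : Prop := out = printFollows_alt X
instance (X : List String) (out : List (Int × String)) : Decidable (Spec_printFollows X out) := by unfold Spec_printFollows; infer_instance

-- ===== CLAIM (what is proved, stated in full; the proofs are below) =====
def Claim_equal_printFollows : Prop := ∀ (X : List String), Dom_printFollows X → Pre_printFollows X → Spec_printFollows X (printFollows X)

-- ===== LEMMAS AND PROOFS =====

-- A's per-string loop body, split into its two identical half-steps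
def pvStepC (st : PySem.Dict Int String × Int) (e : String) : PySem.Dict Int String × Int :=
  if e ∈ st.1.values then st else (st.1.insert st.2 e, st.2 + 1)

-- first-seen accumulator step (proof intermediary between the two algorithms)
def pvIns (acc : List String) (e : String) : List String :=
  if e ∈ acc then acc else acc ++ [e]

-- A's fold over X is the fold of the half-step over the flattened element stream
theorem pvFoldA_eq_flat (X : List String) (st : PySem.Dict Int String × Int) :
    X.foldl (fun st i =>
      let st1 := if pyCharAt i 0 ∈ st.1.values then st else (st.1.insert st.2 (pyCharAt i 0), st.2 + 1)
      if pyCharAt i 1 ∈ st1.1.values then st1 else (st1.1.insert st1.2 (pyCharAt i 1), st1.2 + 1)) st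
    = (X.flatMap (fun p => [pyCharAt p 0, pyCharAt p 1])).foldl pvStepC st := by
  induction X generalizing st with
  | nil => rfl
  | cons x xs ih => simp [List.foldl, ih, pvStepC]

-- the loop invariant: A's (dict, counter) state is (enumerate uniques, |uniques|)
theorem pvInvariant (flat : List String) (acc : List String) :
    flat.foldl pvStepC (PySem.Dict.mk (PySem.List.enumerate acc 0), (acc.length : Int))
    = (PySem.Dict.mk (PySem.List.enumerate (flat.foldl pvIns acc) 0),
       ((flat.foldl pvIns acc).length : Int)) := by
  induction flat generalizing acc with
  | nil => rfl
  | cons e rest ih =>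
    have hstep : pvStepC (PySem.Dict.mk (PySem.List.enumerate acc 0), (acc.length : Int)) e
        = (PySem.Dict.mk (PySem.List.enumerate (pvIns acc e) 0), ((pvIns acc e).length : Int)) := by
      by_cases he : e ∈ acc
      · simp [pvStepC, pvIns, he, PySem.List.map_snd_enumerate]
      · have hnc : (PySem.Dict.mk (PySem.List.enumerate acc 0)).contains (acc.length : Int) = false := by
          simp [PySem.Dict.contains_eq_decide_mem_keys, PySem.Dict.keys,
                PySem.List.map_fst_enumerate, PySem.List.mem_pyRange_one]
        simp only [pvStepC, pvIns]
        rw [if_neg (by simp [PySem.Dict.values, PySem.List.map_snd_enumerate, he]),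
            if_neg he]
        refine Prod.ext ?_ ?_
        · apply PySem.Dict.ext
          rw [PySem.Dict.items_insert_of_not_contains _ _ hnc]
          simp [PySem.List.enumerate_append, PySem.List.enumerate_cons]
        · simp
    rw [List.foldl_cons, List.foldl_cons, hstep, ih]

-- the first-seen accumulator fold equals B's front-stripping loop on the not-yet-seen stream
theorem pvFold_eq_loop (l : List String) (acc : List String) :
    l.foldl pvIns acc = pvLoop acc (l.filter (fun e => !(decide (e ∈ acc)))) := by
  induction l generalizing acc with
  | nil => simp [pvLoop]
  | cons e t ih =>
    by_cases he : e ∈ acc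
    · simpa [List.foldl_cons, pvIns, he] using ih acc
    · rw [List.foldl_cons]
      have h1 : pvIns acc e = acc ++ [e] := by simp [pvIns, he]
      rw [h1, ih (acc ++ [e])]
      have hfil : t.filter (fun x => !(decide (x ∈ acc ++ [e])))
          = (t.filter (fun x => !(decide (x ∈ acc)))).filter (fun x => !(x == e)) := by
        rw [List.filter_filter]
        apply List.filter_congr
        intro x _
        by_cases hx : x ∈ acc <;> by_cases hxe : x = e <;> simp [hx, hxe]
      rw [hfil]
      simp [he, pvLoop]

theorem pvEq (X : List String) : printFollows X = printFollows_alt X := by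
  unfold printFollows printFollows_alt
  rw [pvFoldA_eq_flat]
  have h0 : (PySem.Dict.empty : PySem.Dict Int String)
      = PySem.Dict.mk (PySem.List.enumerate ([] : List String) 0) := rfl
  rw [h0]
  have h := pvInvariant (X.flatMap (fun p => [pyCharAt p 0, pyCharAt p 1])) []
  simp only [List.length_nil, Nat.cast_zero] at h
  rw [h]
  have h2 := pvFold_eq_loop (X.flatMap (fun p => [pyCharAt p 0, pyCharAt p 1])) []
  simp only [List.not_mem_nil, decide_false, Bool.not_false, List.filter_true] at h2
  rw [h2]

-- ===== VERDICT (by name: the statement is the Claim_ definition above) =====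
theorem printFollows_spec : Claim_equal_printFollows := by
  intro X _ _
  unfold Spec_printFollows
  exact pvEq X
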